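-- pv_equiv track=rewrite | github.com/jeremy-rifkin/build-blame | main.py | strip_template_parameters
-- ===== SOURCE A (Python) =====
-- def strip_template_parameters(s: str):
--     out = ""
--     depth = 0
--     for c in s:
--         if c == '<':
--             depth += 1
--         elif c == '>':
--             depth -= 1
--         elif depth == 0:
--             out += c
--     return out
-- ===== SOURCE B (Python) =====
-- def strip_template_parameters(s: str):
--     # table-then-filter: build per-char deltas and a cumulative depth table,
--     # then keep exactly the non-bracket chars whose depth is 0
--     deltas = [(c == '<') - (c == '>') for c in s]
--     depths = []
--     t = 0
--     for d in deltas: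
--         t += d
--         depths.append(t)
--     return ''.join(c for c, d, dep in zip(s, deltas, depths) if d == 0 and dep == 0)
-- ===== Notes on version B (the rewrite author's own statement) =====
-- stated objective: alternative
-- what changed: Replaces A's single stateful loop (depth counter plus string concatenation) by a table-then-filter pipeline: a per-char delta table, a cumulative-depth prefix-sum table, then one comprehension keeping the non-bracket chars at depth 0, joined once.
import Mathlib
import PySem

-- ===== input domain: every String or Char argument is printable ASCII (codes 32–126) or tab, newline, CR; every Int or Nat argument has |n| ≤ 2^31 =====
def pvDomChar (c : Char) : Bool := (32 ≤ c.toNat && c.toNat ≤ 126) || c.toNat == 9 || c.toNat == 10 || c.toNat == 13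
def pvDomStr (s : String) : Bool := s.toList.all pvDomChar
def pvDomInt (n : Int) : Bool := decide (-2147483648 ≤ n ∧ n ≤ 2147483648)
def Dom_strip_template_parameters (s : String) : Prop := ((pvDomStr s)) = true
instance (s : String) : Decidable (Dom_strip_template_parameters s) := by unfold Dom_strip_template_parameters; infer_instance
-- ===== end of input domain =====

-- B replaces A's single stateful loop by a delta table + cumulative-depth table + filter pipeline (objective: alternative).

-- ===== PORT A =====
-- A: one loop carrying (out, depth); appends c when depth = 0 and c is no bracket.
def strip_template_parameters (s : String) : String :=
  let r := s.toList.foldl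
    (fun (st : List Char × Int) c =>
      if c = '<' then (st.1, st.2 + 1)
      else if c = '>' then (st.1, st.2 - 1)
      else if st.2 = 0 then (st.1 ++ [c], st.2)
      else st)
    ([], 0)
  String.mk r.1

-- ===== PORT B =====
-- (c == '<') - (c == '>') on Python bools
def stpDelta (c : Char) : Int :=
  (if c = '<' then 1 else 0) - (if c = '>' then 1 else 0)

-- the running-sum loop building the depth table
def stpScan (t : Int) : List Int → List Int
  | [] => []
  | d :: ds => (t + d) :: stpScan (t + d) ds

def strip_template_parameters_alt (s : String) : String :=
  let cs := s.toList
  let deltas := cs.map stpDelta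
  let depths := stpScan 0 deltas
  String.mk ((cs.zip (deltas.zip depths)).filterMap
    (fun p => if p.2.1 = 0 ∧ p.2.2 = 0 then some p.1 else none))

-- ===== PRECONDITION & SPEC =====
def Spec_strip_template_parameters (s : String) (out : String) : Prop := out = strip_template_parameters_alt s
instance (s : String) (out : String) : Decidable (Spec_strip_template_parameters s out) := by unfold Spec_strip_template_parameters; infer_instance

-- ===== CLAIM (what is proved, stated in full; the proofs are below) =====
def Claim_equal_strip_template_parameters : Prop := ∀ (s : String), Dom_strip_template_parameters s → Spec_strip_template_parameters s (strip_template_parameters s)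

-- ===== LEMMAS AND PROOFS =====
theorem stp_loop_eq (cs : List Char) : ∀ (t : Int) (acc : List Char),
    (cs.foldl
      (fun (st : List Char × Int) c =>
        if c = '<' then (st.1, st.2 + 1)
        else if c = '>' then (st.1, st.2 - 1)
        else if st.2 = 0 then (st.1 ++ [c], st.2)
        else st)
      (acc, t)).1
    = acc ++ (cs.zip ((cs.map stpDelta).zip (stpScan t (cs.map stpDelta)))).filterMap
        (fun p => if p.2.1 = 0 ∧ p.2.2 = 0 then some p.1 else none) := by
  induction cs with
  | nil => intro t acc; simp
  | cons c cs ih =>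
    intro t acc
    by_cases h1 : c = '<'
    · simp [h1, List.foldl, stpDelta, stpScan, ih]
    · by_cases h2 : c = '>'
      · have e : t + -1 = t - 1 := by ring
        simp [h2, List.foldl, stpDelta, stpScan, e, ih]
      · by_cases h3 : t = 0
        · simp [h1, h2, h3, List.foldl, stpDelta, stpScan, ih]
        · simp [h1, h2, h3, List.foldl, stpDelta, stpScan, ih]

-- ===== VERDICT (by name: the statement is the Claim_ definition above) =====
theorem strip_template_parameters_spec : Claim_equal_strip_template_parameters := by
  intro s _
  unfold Spec_strip_template_parameters strip_template_parameters strip_template_parameters_alt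
  simp [stp_loop_eq]
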